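-- pv_equiv track=rewrite | github.com/dhruvtpatel/2540_finalproj | code/functions/transformed_functions.py | square_accumulator_transformed
-- ===== SOURCE A (Python) =====
-- def square_accumulator_transformed(x: int):
--     b_early = sum(i * i for i in range(x)) % 100 == 55
--     acc = 0
--     for i in range(x):
--         acc += i * i
--     final = acc % 100
--     b_final = (final == 55)
--     assert b_early == b_final, "Early and final assertions are not equivalent"
--     return final
-- ===== SOURCE B (Python) =====
-- def square_accumulator_transformed(x: int):
--     # Closed form: sum_{i=0}^{x-1} i^2 = (x-1)*x*(2x-1)/6, then mod 100.
--     if x <= 0: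
--         return 0
--     return ((x - 1) * x * (2 * x - 1) // 6) % 100
-- ===== Notes on version B (the rewrite author's own statement) =====
-- stated objective: faster
-- what changed: Replaces the O(x) accumulation loop (and its duplicate generator sum) with the closed-form formula (x-1)x(2x-1)/6 mod 100, guarding x<=0 with 0.
import Mathlib
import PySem

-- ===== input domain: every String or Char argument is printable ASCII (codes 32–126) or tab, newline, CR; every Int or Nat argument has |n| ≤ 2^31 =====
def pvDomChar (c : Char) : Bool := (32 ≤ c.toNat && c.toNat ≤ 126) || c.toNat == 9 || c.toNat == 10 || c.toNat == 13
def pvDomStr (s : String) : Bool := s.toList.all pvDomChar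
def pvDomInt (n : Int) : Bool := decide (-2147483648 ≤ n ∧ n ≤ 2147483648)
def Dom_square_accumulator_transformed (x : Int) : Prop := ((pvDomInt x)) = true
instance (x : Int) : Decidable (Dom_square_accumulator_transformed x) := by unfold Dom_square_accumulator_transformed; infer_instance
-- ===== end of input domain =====

-- B replaces A's O(x) accumulation loop with the closed-form (x-1)x(2x-1)//6 mod 100 (objective: faster).

-- ===== PORT A =====
-- Transliteration of A. A's `assert b_early == b_final` compares the generator-sum check with
-- the loop-sum check; both are computed below exactly as in A, and lemma pv_assert_ok proves
-- they are always equal, so the assert never raises (A is total).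
def square_accumulator_transformed (x : Int) : Int :=
  let b_early := PySem.Int.mod (((PySem.List.pyRange 0 x 1).map (fun i => i * i)).sum) 100 == 55
  let acc := (PySem.List.pyRange 0 x 1).foldl (fun acc i => acc + i * i) 0
  let final := PySem.Int.mod acc 100
  let b_final := final == 55
  let _assert_holds := b_early == b_final  -- always true (pv_assert_ok below)
  final

-- ===== PORT B =====
def square_accumulator_transformed_alt (x : Int) : Int :=
  if x ≤ 0 then 0
  else PySem.Int.mod (PySem.Int.floordiv ((x - 1) * x * (2 * x - 1)) 6) 100

-- ===== PRECONDITION & SPEC =====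
def Spec_square_accumulator_transformed (x : Int) (out : Int) : Prop := out = square_accumulator_transformed_alt x
instance (x : Int) (out : Int) : Decidable (Spec_square_accumulator_transformed x out) := by unfold Spec_square_accumulator_transformed; infer_instance

-- ===== CLAIM (what is proved, stated in full; the proofs are below) =====
def Claim_equal_square_accumulator_transformed : Prop := ∀ (x : Int), Dom_square_accumulator_transformed x → Spec_square_accumulator_transformed x (square_accumulator_transformed x)

-- ===== LEMMAS AND PROOFS =====

theorem pv_foldl_sq (l : List Int) (a : Int) :
    l.foldl (fun acc i => acc + i * i) a = a + (l.map (fun i => i * i)).sum := by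
  induction l generalizing a with
  | nil => simp
  | cons h t ih => simp [List.foldl, ih]; ring

theorem pv_sumsq (n : Nat) :
    ((List.range n).map (fun k : Nat => (k : Int) * (k : Int))).sum * 6
      = ((n : Int) - 1) * (n : Int) * (2 * (n : Int) - 1) := by
  induction n with
  | zero => simp
  | succ n ih =>
    rw [List.range_succ]
    simp only [List.map_append, List.map_cons, List.map_nil, List.sum_append, List.sum_cons,
      List.sum_nil]
    push_cast
    linear_combination ih

theorem pv_sum_pyRange (x : Int) :
    ((PySem.List.pyRange 0 x 1).map (fun i => i * i)).sum * 6
      = ((x.toNat : Int) - 1) * (x.toNat : Int) * (2 * (x.toNat : Int) - 1) := by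
  rw [PySem.List.pyRange_one, List.map_map]
  simp only [Int.sub_zero, Function.comp_def, zero_add]
  exact pv_sumsq x.toNat

-- A's assert never fires: the two compared booleans come from the same sum.
theorem pv_assert_ok (x : Int) :
    (PySem.Int.mod (((PySem.List.pyRange 0 x 1).map (fun i => i * i)).sum) 100 == 55)
      = (PySem.Int.mod ((PySem.List.pyRange 0 x 1).foldl (fun acc i => acc + i * i) 0) 100 == 55) := by
  rw [pv_foldl_sq, zero_add]

-- ===== VERDICT (by name: the statement is the Claim_ definition above) =====
theorem square_accumulator_transformed_spec : Claim_equal_square_accumulator_transformed := by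
  intro x _
  unfold Spec_square_accumulator_transformed square_accumulator_transformed
    square_accumulator_transformed_alt
  rw [pv_foldl_sq, zero_add]
  by_cases hx : x ≤ 0
  · rw [if_pos hx, PySem.List.pyRange_one]
    rw [Int.sub_zero, Int.toNat_of_nonpos hx]
    simp [PySem.Int.mod]
  · rw [if_neg hx]
    have hs := pv_sum_pyRange x
    rw [Int.toNat_of_nonneg (by omega)] at hs
    rw [← hs, PySem.Int.floordiv_eq_ediv_of_pos (by norm_num),
      Int.mul_ediv_cancel _ (by norm_num)]
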